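-- pv_equiv track=rewrite | github.com/drhicks/Kejia_peptide_binders | colabfold_initial_guess/colabfold/batch_ig.py | pad_sequences
-- ===== SOURCE A (Python) =====
-- from typing import Any, Callable, Dict, List, Optional, Tuple, Union, TYPE_CHECKING
--
-- def pad_sequences(
--     a3m_lines: List[str], query_sequences: List[str], query_cardinality: List[int]
-- ) -> str:
--     _blank_seq = [
--         ("-" * len(seq))
--         for n, seq in enumerate(query_sequences)
--         for _ in range(query_cardinality[n])
--     ]
--     a3m_lines_combined = []
--     pos = 0
--     for n, seq in enumerate(query_sequences):
--         for j in range(0, query_cardinality[n]):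
--             lines = a3m_lines[n].split("\n")
--             for a3m_line in lines:
--                 if len(a3m_line) == 0:
--                     continue
--                 if a3m_line.startswith(">"):
--                     a3m_lines_combined.append(a3m_line)
--                 else:
--                     a3m_lines_combined.append(
--                         "".join(_blank_seq[:pos] + [a3m_line] + _blank_seq[pos + 1 :])
--                     )
--             pos += 1
--     return "\n".join(a3m_lines_combined)
-- ===== SOURCE B (Python) =====
-- def pad_sequences(a3m_lines, query_sequences, query_cardinality):
--     # pass 1: flat slot table: source index and blank pad per copy
--     srcs = []
--     blanks = []
--     for n in range(len(query_sequences)):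
--         pad = "-" * len(query_sequences[n])
--         for _ in range(query_cardinality[n]):
--             srcs.append(n)
--             blanks.append(pad)
--     m = len(blanks)
--     # pass 2: suffix pads, built back to front
--     suf = [""] * (m + 1)
--     for i in range(m - 1, -1, -1):
--         suf[i] = blanks[i] + suf[i + 1]
--     # pass 3: prefix pads, front to back
--     pre = [""]
--     for b in blanks:
--         pre.append(pre[-1] + b)
--     # pass 4: parse each distinct source once (A re-splits per copy)
--     parsed = {}
--     for n in srcs:
--         if n not in parsed:
--             parsed[n] = [l for l in a3m_lines[n].split("\n") if l]
--     # pass 5: emit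
--     return "\n".join(
--         l if l.startswith(">") else pre[i] + l + suf[i + 1]
--         for i in range(m)
--         for l in parsed[srcs[i]]
--     )
-- ===== Notes on version B (the rewrite author's own statement) =====
-- stated objective: alternative
-- what changed: A is one stateful nested loop that re-splits a3m_lines[n] for every copy and pads each line by slicing and re-joining the blank list (blanks[:pos]+[line]+blanks[pos+1:]); B is staged passes over a flat slot table: suffix pads built back-to-front, prefix pads as a running accumulator, a dict caching each source's parsed non-empty lines so no source is split twice, and one final emit pass gluing pre[i]+line+suf[i+1].
import Mathlib
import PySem

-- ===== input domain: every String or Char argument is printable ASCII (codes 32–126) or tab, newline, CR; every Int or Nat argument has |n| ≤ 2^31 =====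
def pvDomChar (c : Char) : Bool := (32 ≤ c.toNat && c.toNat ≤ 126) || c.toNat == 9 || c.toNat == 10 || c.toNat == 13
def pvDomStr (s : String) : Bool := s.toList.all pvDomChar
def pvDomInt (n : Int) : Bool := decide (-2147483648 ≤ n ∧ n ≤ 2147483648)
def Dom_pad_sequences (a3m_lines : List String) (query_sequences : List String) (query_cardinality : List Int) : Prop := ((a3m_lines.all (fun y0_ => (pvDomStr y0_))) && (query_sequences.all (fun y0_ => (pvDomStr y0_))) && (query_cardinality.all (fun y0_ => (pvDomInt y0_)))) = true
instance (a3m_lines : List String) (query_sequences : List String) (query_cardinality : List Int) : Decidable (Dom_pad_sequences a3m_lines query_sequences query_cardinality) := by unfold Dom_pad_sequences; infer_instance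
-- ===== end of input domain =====

-- B replaces A's single stateful nested loop (re-splitting each source per copy, padding each line by
-- slicing and re-joining the blank list) with staged passes: a flat slot table, suffix pads built
-- back-to-front, prefix pads by a running accumulator, a dict caching each source's parsed non-empty
-- lines, and one final emit pass gluing pre[i] + line + suf[i+1].

-- ===== PORT A =====
-- the _blank_seq comprehension; "-" * len(seq) ported by hand as a replicate (exact: len(seq) ≥ 0)
def pvBlankA (query_sequences : List String) (query_cardinality : List Int) : List String :=
  (PySem.List.enumerate query_sequences 0).flatMap (fun p =>
    (PySem.List.pyRange 0 (PySem.List.pyGetD query_cardinality p.1 0) 1).map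
      (fun _ => String.ofList (List.replicate (PySem.Str.len p.2).toNat '-')))
-- a3m_lines[n].split("\n"); "\n" ≠ "" so split? is always some
def pvLinesA (a3m_lines : List String) (i : Int) : List String :=
  (PySem.Str.split? (PySem.List.pyGetD a3m_lines i "") "\n").getD []
-- the body of `for a3m_line in lines`; pos ≥ 0 always, so _blank_seq[:pos] / _blank_seq[pos+1:]
-- are ported exactly as take pos / drop (pos+1)
def pvLineStepA (bl : List String) (pos : Nat) (acc : List String) (l : String) : List String :=
  if PySem.Str.len l = 0 then acc
  else if PySem.Str.startswith l ">" then acc ++ [l]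
  else acc ++ [PySem.Str.join "" (bl.take pos ++ [l] ++ bl.drop (pos + 1))]
-- one iteration of `for j in range(0, query_cardinality[n])` on state (pos, a3m_lines_combined)
def pvCopyStepA (a3m_lines : List String) (query_sequences : List String) (query_cardinality : List Int)
    (st : Nat × List String) (i : Int) : Nat × List String :=
  (st.1 + 1, (pvLinesA a3m_lines i).foldl (pvLineStepA (pvBlankA query_sequences query_cardinality) st.1) st.2)

def pad_sequences (a3m_lines : List String) (query_sequences : List String) (query_cardinality : List Int) : String :=
  PySem.Str.join "\n"
    (((PySem.List.enumerate query_sequences 0).foldl (fun st p =>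
        (PySem.List.pyRange 0 (PySem.List.pyGetD query_cardinality p.1 0) 1).foldl
          (fun st2 _ => pvCopyStepA a3m_lines query_sequences query_cardinality st2 p.1) st)
      (0, [])).2)

-- ===== PORT B =====  (transliteration of Source B, pass for pass)
-- "-" * len(query_sequences[n])
def pvPadB (s : String) : String := String.ofList (List.replicate (PySem.Str.len s).toNat '-')
-- pass 1: the nested loop appending to srcs and blanks in parallel
def pvTableB (query_sequences : List String) (query_cardinality : List Int) : List Int × List String :=
  (PySem.List.pyRange 0 (query_sequences.length : Int) 1).foldl (fun st n =>
    (PySem.List.pyRange 0 (PySem.List.pyGetD query_cardinality n 0) 1).foldl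
      (fun st2 _ => (st2.1 ++ [n], st2.2 ++ [pvPadB (PySem.List.pyGetD query_sequences n "")])) st)
    ([], [])
-- pass 2: suf[i] = blanks[i] + suf[i+1], filled back to front (the backwards index loop becomes
-- structural recursion producing the same suffix strings in the same back-to-front order)
def pvSufB : List String → List String
  | [] => [""]
  | b :: t => (b ++ (pvSufB t).headD "") :: pvSufB t
-- pass 3: pre.append(pre[-1] + b)
def pvPreB (blanks : List String) : List String :=
  blanks.foldl (fun ps b => ps ++ [ps.getLastD "" ++ b]) [""]
-- pass 4 helper: [l for l in a3m_lines[n].split("\n") if l]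
def pvParseOne (a3m_lines : List String) (n : Int) : List String :=
  ((PySem.Str.split? (PySem.List.pyGetD a3m_lines n "") "\n").getD []).filter (fun l => !(l == ""))
-- pass 4: the caching dict (insert once per distinct source)
def pvParseB (a3m_lines : List String) (srcs : List Int) : PySem.Dict Int (List String) :=
  srcs.foldl (fun d n => if d.contains n then d else d.insert n (pvParseOne a3m_lines n))
    PySem.Dict.empty

def pad_sequences_alt (a3m_lines : List String) (query_sequences : List String) (query_cardinality : List Int) : String :=
  let t := pvTableB query_sequences query_cardinality
  let m := t.2.length
  let suf := pvSufB t.2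
  let pre := pvPreB t.2
  let parsed := pvParseB a3m_lines t.1
  PySem.Str.join "\n"
    ((PySem.List.pyRange 0 (m : Int) 1).flatMap (fun i =>
      -- parsed[srcs[i]]: the key is always present (inserted in pass 4), so getD [] is exact
      ((parsed.get? (PySem.List.pyGetD t.1 i 0)).getD []).map (fun l =>
        if PySem.Str.startswith l ">" then l
        else PySem.List.pyGetD pre i "" ++ l ++ PySem.List.pyGetD suf (i + 1) "")))

-- ===== PRECONDITION & SPEC =====
-- Python A raises IndexError iff query_cardinality is shorter than query_sequences, or some
-- position with a positive cardinality has no a3m_lines entry; Pre_ excludes exactly those inputs.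
def Pre_pad_sequences (a3m_lines : List String) (query_sequences : List String) (query_cardinality : List Int) : Prop :=
  query_sequences.length ≤ query_cardinality.length ∧
  ∀ i ∈ List.range query_sequences.length,
    0 < PySem.List.pyGetD query_cardinality (i : Int) 0 → i < a3m_lines.length
instance (a3m_lines : List String) (query_sequences : List String) (query_cardinality : List Int) : Decidable (Pre_pad_sequences a3m_lines query_sequences query_cardinality) := by unfold Pre_pad_sequences; infer_instance

def pvWitness_pad_sequences : List String × List String × List Int := ([">s\nAB"], ["AB"], [2])

def Spec_pad_sequences (a3m_lines : List String) (query_sequences : List String) (query_cardinality : List Int) (out : String) : Prop := out = pad_sequences_alt a3m_lines query_sequences query_cardinality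
instance (a3m_lines : List String) (query_sequences : List String) (query_cardinality : List Int) (out : String) : Decidable (Spec_pad_sequences a3m_lines query_sequences query_cardinality out) := by unfold Spec_pad_sequences; infer_instance

-- ===== CLAIM (what is proved, stated in full; the proofs are below) =====
def Claim_equal_pad_sequences : Prop := ∀ (a3m_lines : List String) (query_sequences : List String) (query_cardinality : List Int), Dom_pad_sequences a3m_lines query_sequences query_cardinality → Pre_pad_sequences a3m_lines query_sequences query_cardinality → Spec_pad_sequences a3m_lines query_sequences query_cardinality (pad_sequences a3m_lines query_sequences query_cardinality)

-- ===== LEMMAS AND PROOFS =====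

def pvJ (u : List String) : String := PySem.Str.join "" u

theorem pvJoinNilChars (L : List (List Char)) : PySem.Chars.join [] L = L.flatten := by
  induction L with
  | nil => simp [PySem.Chars.join_nil]
  | cons a t ih =>
    cases t with
    | nil => simp [PySem.Chars.join_singleton]
    | cons b r => rw [PySem.Chars.join_cons_cons]; simp [ih]

theorem pvJ_toList (u : List String) : (pvJ u).toList = (u.map String.toList).flatten := by
  rw [pvJ, PySem.Str.toList_join]
  have h : ("" : String).toList = [] := rfl
  rw [h, pvJoinNilChars]

theorem pvJ_nil : pvJ [] = "" := by
  refine String.toList_inj.mp ?_; rw [pvJ_toList]; rfl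

theorem pvJ_cons (b : String) (u : List String) : pvJ (b :: u) = b ++ pvJ u := by
  refine String.toList_inj.mp ?_
  simp [pvJ_toList, String.toList_append]

-- canonical pieces shared by the two reductions
def pvSl (query_sequences : List String) (query_cardinality : List Int) : List Int :=
  (PySem.List.pyRange 0 (query_sequences.length : Int) 1).flatMap (fun n =>
    (PySem.List.pyRange 0 (PySem.List.pyGetD query_cardinality n 0) 1).map (fun _ => n))
def pvBl (query_sequences : List String) (query_cardinality : List Int) : List String :=
  (PySem.List.pyRange 0 (query_sequences.length : Int) 1).flatMap (fun n =>
    (PySem.List.pyRange 0 (PySem.List.pyGetD query_cardinality n 0) 1).map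
      (fun _ => pvPadB (PySem.List.pyGetD query_sequences n "")))
def pvPadLine (bl : List String) (i : Nat) (l : String) : String :=
  if PySem.Str.startswith l ">" then l else pvJ (bl.take i) ++ l ++ pvJ (bl.drop (i + 1))
def pvEmit (a3m_lines : List String) (bl : List String) (i : Nat) (n : Int) : List String :=
  (pvParseOne a3m_lines n).map (pvPadLine bl i)

-- ---- the blank lists agree ----
theorem pvBlankA_eq (qs : List String) (qc : List Int) : pvBlankA qs qc = pvBl qs qc := by
  rw [pvBlankA, pvBl, PySem.List.enumerate_eq_map_pyRange qs "", List.flatMap_map]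
  simp [PySem.Str.len_eq, pvPadB]

-- ---- pass 1 computes (pvSl, pvBl) ----
theorem pvInnerFold {β : Type} (r : List β) (x : Int) (y : String) :
    ∀ st : List Int × List String,
      r.foldl (fun st2 _ => (st2.1 ++ [x], st2.2 ++ [y])) st
        = (st.1 ++ r.map (fun _ => x), st.2 ++ r.map (fun _ => y)) := by
  induction r with
  | nil => intro st; simp
  | cons a t ih => intro st; simp [List.foldl_cons, ih]

theorem pvTableAux (qs : List String) (qc : List Int) (L : List Int) :
    ∀ st : List Int × List String,
      L.foldl (fun st n =>
        (PySem.List.pyRange 0 (PySem.List.pyGetD qc n 0) 1).foldl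
          (fun st2 _ => (st2.1 ++ [n], st2.2 ++ [pvPadB (PySem.List.pyGetD qs n "")])) st) st
      = (st.1 ++ L.flatMap (fun n => (PySem.List.pyRange 0 (PySem.List.pyGetD qc n 0) 1).map (fun _ => n)),
         st.2 ++ L.flatMap (fun n => (PySem.List.pyRange 0 (PySem.List.pyGetD qc n 0) 1).map
           (fun _ => pvPadB (PySem.List.pyGetD qs n "")))) := by
  induction L with
  | nil => intro st; simp
  | cons n t ih =>
    intro st
    rw [List.foldl_cons, pvInnerFold, ih]
    simp

theorem pvTableB_eq (qs : List String) (qc : List Int) :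
    pvTableB qs qc = (pvSl qs qc, pvBl qs qc) := by
  rw [pvTableB, pvTableAux]
  rfl

-- ---- A's slot list is pvSl ----
theorem pvFoldConst {α β σ : Type} (g : σ → β → σ) (r : List α) (x : β) (st : σ) :
    r.foldl (fun s _ => g s x) st = (r.map (fun _ => x)).foldl g st := by
  induction r generalizing st with
  | nil => rfl
  | cons a t ih => simp [List.foldl_cons, ih]

theorem pvAouter (a3m_lines qs : List String) (qc : List Int) (qsE : List (Int × String)) :
    ∀ (st : Nat × List String),
      qsE.foldl (fun st p =>
        (PySem.List.pyRange 0 (PySem.List.pyGetD qc p.1 0) 1).foldl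
          (fun st2 _ => pvCopyStepA a3m_lines qs qc st2 p.1) st) st
      = (qsE.flatMap (fun p => (PySem.List.pyRange 0 (PySem.List.pyGetD qc p.1 0) 1).map (fun _ => p.1))).foldl
          (pvCopyStepA a3m_lines qs qc) st := by
  induction qsE with
  | nil => intro st; rfl
  | cons p t ih =>
    intro st
    rw [List.foldl_cons, ih, List.flatMap_cons, List.foldl_append,
      pvFoldConst (pvCopyStepA a3m_lines qs qc) _ p.1 st]

theorem pvSlotsA_eq (qs : List String) (qc : List Int) :
    (PySem.List.enumerate qs 0).flatMap
      (fun p => (PySem.List.pyRange 0 (PySem.List.pyGetD qc p.1 0) 1).map (fun _ => p.1))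
    = pvSl qs qc := by
  rw [PySem.List.enumerate_eq_map_pyRange qs "", List.flatMap_map, pvSl]
  simp

-- ---- the inner line loop of A appends the filtered, padded lines ----
theorem pvLenZero_iff (l : String) : PySem.Str.len l = 0 ↔ (l == "") = true := by
  rw [PySem.Str.len_eq, beq_iff_eq]
  constructor
  · intro h
    have : l.toList = [] := List.eq_nil_of_length_eq_zero (by exact_mod_cast h)
    exact String.toList_inj.mp this
  · intro h; subst h; rfl

theorem pvJ_mid (u v : List String) (l : String) : pvJ (u ++ l :: v) = pvJ u ++ l ++ pvJ v := by
  refine String.toList_inj.mp ?_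
  simp [pvJ_toList, String.toList_append]

theorem pvLineFold (bl : List String) (pos : Nat) (lines : List String) :
    ∀ acc, lines.foldl (pvLineStepA bl pos) acc
      = acc ++ (lines.filter (fun l => !(l == ""))).map (pvPadLine bl pos) := by
  induction lines with
  | nil => intro acc; simp
  | cons l t ih =>
    intro acc
    rw [List.foldl_cons, List.filter_cons]
    by_cases hz : PySem.Str.len l = 0
    · have heq : l = "" := by have := (pvLenZero_iff l).mp hz; simpa using this
      subst heq
      have hstep : pvLineStepA bl pos acc "" = acc := by
        simp only [pvLineStepA]
        rw [if_pos hz]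
      rw [hstep, ih]
      simp
    · have hne : (l == "") = false := by
        by_contra hc
        exact hz ((pvLenZero_iff l).mpr (by simpa using hc))
      have hstep : pvLineStepA bl pos acc l = acc ++ [pvPadLine bl pos l] := by
        simp only [pvLineStepA, pvPadLine]
        rw [if_neg hz]
        by_cases hs : PySem.Str.startswith l ">"
        · rw [if_pos hs, if_pos hs]
        · rw [if_neg hs, if_neg hs]
          have hsplit : bl.take pos ++ [l] ++ bl.drop (pos + 1) = bl.take pos ++ l :: bl.drop (pos + 1) := by
            simp
          rw [hsplit]
          simp only [show PySem.Str.join "" (List.take pos bl ++ l :: List.drop (pos + 1) bl)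
              = pvJ (List.take pos bl ++ l :: List.drop (pos + 1) bl) from rfl,
            pvJ_mid]
      rw [hne, hstep, ih]
      simp

-- ---- A's slot fold in canonical form ----
theorem pvMainA (a3m_lines qs : List String) (qc : List Int) (sl : List Int) :
    ∀ (k : Nat) (acc : List String),
      (sl.foldl (pvCopyStepA a3m_lines qs qc) (k, acc)).2
        = acc ++ (sl.zipIdx k).flatMap (fun p => pvEmit a3m_lines (pvBlankA qs qc) p.2 p.1) := by
  induction sl with
  | nil => intro k acc; simp
  | cons n t ih =>
    intro k acc
    rw [List.foldl_cons]
    have hstep : pvCopyStepA a3m_lines qs qc (k, acc) n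
        = (k + 1, acc ++ pvEmit a3m_lines (pvBlankA qs qc) k n) := by
      rw [pvCopyStepA]
      dsimp only
      rw [pvLineFold]
      rfl
    rw [hstep, ih]
    simp [List.zipIdx_cons, pvEmit]

-- ---- zipIdx flatMap as a range flatMap ----
theorem pvZipIdxRange {β : Type} (E : Nat → Int → List β) (sl : List Int) :
    ∀ k, (sl.zipIdx k).flatMap (fun p => E p.2 p.1)
      = (List.range sl.length).flatMap (fun i => E (k + i) (sl.getD i 0)) := by
  induction sl with
  | nil => intro k; simp
  | cons n t ih =>
    intro k
    rw [List.zipIdx_cons, List.flatMap_cons, ih (k + 1), List.length_cons,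
      List.range_succ_eq_map, List.flatMap_cons, List.flatMap_map]
    congr 1
    apply List.flatMap_congr
    intro i _
    simp [Nat.succ_eq_add_one]
    ring_nf

-- ---- pass 3: indexing the prefix-pad list ----
theorem pvPreAux (bl : List String) :
    ∀ ps : List String,
      bl.foldl (fun ps b => ps ++ [ps.getLastD "" ++ b]) ps
        = ps ++ (List.range bl.length).map (fun k => ps.getLastD "" ++ pvJ (bl.take (k + 1))) := by
  induction bl with
  | nil => intro ps; simp
  | cons b t ih =>
    intro ps
    rw [List.foldl_cons, ih]
    rw [List.length_cons, List.range_succ_eq_map, List.map_cons, List.map_map]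
    have hlast : (ps ++ [ps.getLastD "" ++ b]).getLastD "" = ps.getLastD "" ++ b :=
      List.getLastD_concat
    rw [hlast]
    simp only [List.take_succ_cons, pvJ_cons, List.take_zero, pvJ_nil, Function.comp_def]
    have h2 : ∀ k, ps.getLastD "" ++ b ++ pvJ (t.take (k + 1))
        = ps.getLastD "" ++ (b ++ pvJ (t.take (k + 1))) := by
      intro k; refine String.toList_inj.mp ?_; simp [String.toList_append]
    simp only [h2]
    simp

theorem pvPreGet (bl : List String) (i : Nat) (hi : i ≤ bl.length) :
    (pvPreB bl).getD i "" = pvJ (bl.take i) := by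
  rw [pvPreB, pvPreAux]
  cases i with
  | zero => simp [pvJ_nil]
  | succ j =>
    have hj : j < bl.length := by omega
    have : (("" :: List.map (fun k => List.getLastD [""] "" ++ pvJ (List.take (k + 1) bl)) (List.range bl.length))).getD (j + 1) ""
        = (List.map (fun k => List.getLastD [""] "" ++ pvJ (List.take (k + 1) bl)) (List.range bl.length)).getD j "" := by
      simp
    rw [List.singleton_append, this,
      List.getD_eq_getElem _ _ (by simpa using hj)]
    simp only [List.getElem_map, List.getElem_range]
    refine String.toList_inj.mp ?_
    simp

-- ---- pass 2: indexing the suffix-pad list ----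
theorem pvHeadD_eq_getD (l : List String) : l.headD "" = l.getD 0 "" := by
  cases l <;> rfl

theorem pvSufGet (bl : List String) : ∀ i, i ≤ bl.length → (pvSufB bl).getD i "" = pvJ (bl.drop i) := by
  induction bl with
  | nil =>
    intro i hi
    have h0 : i = 0 := by simpa using hi
    subst h0
    simp [pvSufB, pvJ_nil]
  | cons b t ih =>
    intro i hi
    cases i with
    | zero =>
      rw [pvSufB]
      simp only [List.getD_cons_zero, List.drop_zero, pvJ_cons]
      rw [pvHeadD_eq_getD, ih 0 (by omega)]
      simp
    | succ j =>
      rw [pvSufB]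
      simp only [List.getD_cons_succ, List.drop_succ_cons]
      exact ih j (by simpa using hi)

-- ---- pass 4: the caching dict always holds pvParseOne ----
theorem pvParseP (a3m_lines : List String) (srcs : List Int) :
    ∀ d : PySem.Dict Int (List String),
      (∀ k v, d.get? k = some v → v = pvParseOne a3m_lines k) →
      ∀ k v, (srcs.foldl (fun d n => if d.contains n then d else d.insert n (pvParseOne a3m_lines n)) d).get? k = some v →
        v = pvParseOne a3m_lines k := by
  induction srcs with
  | nil => intro d hd; exact hd
  | cons n t ih =>
    intro d hd
    rw [List.foldl_cons]
    by_cases hc : d.contains n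
    · rw [if_pos hc]; exact ih d hd
    · rw [if_neg hc]
      refine ih _ ?_
      intro k v hv
      rw [PySem.Dict.get?_insert] at hv
      by_cases hk : k = n
      · subst hk
        rw [if_pos rfl] at hv
        exact (Option.some_inj.mp hv).symm
      · rw [if_neg hk] at hv
        exact hd k v hv

theorem pvParseSome (a3m_lines : List String) (srcs : List Int) :
    ∀ (d : PySem.Dict Int (List String)) (n : Int), n ∈ srcs ∨ (d.get? n).isSome →
      ((srcs.foldl (fun d n => if d.contains n then d else d.insert n (pvParseOne a3m_lines n)) d).get? n).isSome := by
  induction srcs with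
  | nil =>
    intro d n h
    rcases h with h | h
    · simp at h
    · exact h
  | cons m t ih =>
    intro d n h
    rw [List.foldl_cons]
    have hnext : (( if d.contains m then d else d.insert m (pvParseOne a3m_lines m)).get? n).isSome
        ∨ n ∈ t := by
      rcases h with h | h
      · rcases List.mem_cons.mp h with h | h
        · subst h
          left
          by_cases hc : d.contains n
          · rw [if_pos hc, ← PySem.Dict.contains_eq_isSome_get?]; exact hc
          · rw [if_neg hc, PySem.Dict.get?_insert, if_pos rfl]; rfl
        · right; exact h
      · left
        by_cases hc : d.contains m
        · rw [if_pos hc]; exact h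
        · rw [if_neg hc, PySem.Dict.get?_insert]
          by_cases hk : n = m
          · rw [if_pos hk]; rfl
          · rw [if_neg hk]; exact h
    rcases hnext with h | h
    · exact ih _ n (Or.inr h)
    · exact ih _ n (Or.inl h)

theorem pvParseGet (a3m_lines : List String) (srcs : List Int) (n : Int) (hn : n ∈ srcs) :
    (pvParseB a3m_lines srcs).get? n = some (pvParseOne a3m_lines n) := by
  have hsome : ((pvParseB a3m_lines srcs).get? n).isSome := by
    rw [pvParseB]
    refine pvParseSome a3m_lines srcs PySem.Dict.empty n (Or.inl hn)
  obtain ⟨v, hv⟩ := Option.isSome_iff_exists.mp hsome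
  have hval : v = pvParseOne a3m_lines n := by
    refine pvParseP a3m_lines srcs PySem.Dict.empty ?_ n v hv
    intro k w hw
    rw [PySem.Dict.get?_empty] at hw
    exact absurd hw (by simp)
  rw [hv, hval]

-- ---- lengths ----
theorem pvSlBlLen (qs : List String) (qc : List Int) : (pvSl qs qc).length = (pvBl qs qc).length := by
  simp [pvSl, pvBl, List.length_flatMap]

-- ===== VERDICT (by name: the statement is the Claim_ definition above) =====
theorem pad_sequences_spec : Claim_equal_pad_sequences := by
  intro a3m_lines qs qc _ _
  unfold Spec_pad_sequences
  -- A side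
  rw [pad_sequences, pvAouter, pvSlotsA_eq]
  rw [pvMainA a3m_lines qs qc (pvSl qs qc) 0 []]
  rw [List.nil_append, pvZipIdxRange (fun i n => pvEmit a3m_lines (pvBlankA qs qc) i n)]
  -- B side
  rw [pad_sequences_alt]
  simp only [pvTableB_eq]
  congr 1
  rw [PySem.List.pyRange_zero_nat, List.flatMap_map]
  rw [← pvSlBlLen qs qc]
  apply List.flatMap_congr
  intro i hi
  have him : i < (pvSl qs qc).length := List.mem_range.mp hi
  simp only [Nat.zero_add]
  have hmem : (pvSl qs qc).getD i 0 ∈ pvSl qs qc := by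
    rw [List.getD_eq_getElem _ _ him]
    exact List.getElem_mem him
  rw [PySem.List.pyGetD_natCast (pvSl qs qc) i 0,
    pvParseGet a3m_lines (pvSl qs qc) _ hmem, Option.getD_some]
  rw [pvEmit, pvBlankA_eq]
  apply List.map_congr_left
  intro l _
  rw [pvPadLine]
  have hi' : i < (pvBl qs qc).length := by rw [← pvSlBlLen]; exact him
  have hpre : PySem.List.pyGetD (pvPreB (pvBl qs qc)) (i : Int) "" = pvJ ((pvBl qs qc).take i) := by
    rw [PySem.List.pyGetD_natCast]
    exact pvPreGet _ i (le_of_lt hi')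
  have hsuf : PySem.List.pyGetD (pvSufB (pvBl qs qc)) ((i : Int) + 1) "" = pvJ ((pvBl qs qc).drop (i + 1)) := by
    have hc : ((i : Int) + 1) = ((i + 1 : Nat) : Int) := by push_cast; ring
    rw [hc, PySem.List.pyGetD_natCast]
    exact pvSufGet _ (i + 1) (by omega)
  rw [hpre, hsuf]
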